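-- pv_equiv track=rewrite | github.com/teeters/infinite-poetry | poetry.py | limit_to_n_lines
-- ===== SOURCE A (Python) =====
-- def limit_to_n_lines(poem, line_limit):
--     keep = []
--     lines = poem.split('\n')
--     count = 0
--     for line in lines:
--         keep.append(line)
--         if bool(line.strip()):
--             count += 1
--         if count >= line_limit:
--             break
--     return '\n'.join(keep)
-- ===== SOURCE B (Python) =====
-- def limit_to_n_lines(poem, line_limit):
--     lines = poem.split('\n')
--     counts = []
--     c = 0
--     for line in lines:
--         if line.strip():
--             c += 1
--         counts.append(c)
--     cut = next((i for i, n in enumerate(counts) if n >= line_limit), len(lines) - 1)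
--     return '\n'.join(lines[:cut + 1])
-- ===== Notes on version B (the rewrite author's own statement) =====
-- stated objective: alternative
-- what changed: A appends lines while counting non-empty ones and breaks inside a single loop; B first builds a prefix table of cumulative non-empty-line counts, then locates the cut as the first index reaching the limit (default last line) and slices the split lines there.
import Mathlib
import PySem

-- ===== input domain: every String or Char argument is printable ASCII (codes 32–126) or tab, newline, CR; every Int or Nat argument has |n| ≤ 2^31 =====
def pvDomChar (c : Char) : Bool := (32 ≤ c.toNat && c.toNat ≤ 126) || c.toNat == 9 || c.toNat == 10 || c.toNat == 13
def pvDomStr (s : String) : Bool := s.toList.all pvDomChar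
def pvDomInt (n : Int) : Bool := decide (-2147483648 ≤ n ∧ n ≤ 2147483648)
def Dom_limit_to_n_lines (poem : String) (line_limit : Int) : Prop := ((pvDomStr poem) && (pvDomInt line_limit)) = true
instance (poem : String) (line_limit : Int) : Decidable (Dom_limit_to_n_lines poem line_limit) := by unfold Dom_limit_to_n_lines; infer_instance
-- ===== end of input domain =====

-- B truncates the poem by a prefix table of non-empty-line counts plus a first-hit search instead of
-- A's single accumulate-and-break loop; same cost, different decomposition (objective: alternative).

-- ===== PORT A =====
-- the 'for line in lines' loop of A: keep/count accumulators, break when count >= line_limit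
def pvALoop (lines : List String) (count : Int) (keep : List String) (line_limit : Int) : List String :=
  match lines with
  | [] => keep
  | line :: rest =>
    let keep' := keep ++ [line]
    let count' := if PySem.Str.strip line ≠ "" then count + 1 else count
    if count' ≥ line_limit then keep' else pvALoop rest count' keep' line_limit

def limit_to_n_lines (poem : String) (line_limit : Int) : String :=
  -- poem.split('\n') with the literal non-empty separator '\n' (split? is none only for sep = "")
  let lines := ((PySem.Str.split? poem "\n").getD [])
  PySem.Str.join "\n" (pvALoop lines 0 [] line_limit)

-- ===== PORT B =====
-- B's first loop: the prefix table 'counts' of cumulative non-empty-line counts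
def pvBCounts (lines : List String) (c : Int) : List Int :=
  match lines with
  | [] => []
  | line :: rest =>
    let c' := if PySem.Str.strip line ≠ "" then c + 1 else c
    c' :: pvBCounts rest c'

def limit_to_n_lines_alt (poem : String) (line_limit : Int) : String :=
  let lines := ((PySem.Str.split? poem "\n").getD [])
  let counts := pvBCounts lines 0
  -- next((i for i, n in enumerate(counts) if n >= line_limit), len(lines) - 1)
  let cut : Int :=
    match (PySem.List.enumerate counts).find? (fun p => decide (p.2 ≥ line_limit)) with
    | some p => p.1
    | none => PySem.List.len lines - 1
  PySem.Str.join "\n" (PySem.List.slice lines none (some (cut + 1)))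

-- ===== PRECONDITION & SPEC =====
def Spec_limit_to_n_lines (poem : String) (line_limit : Int) (out : String) : Prop := out = limit_to_n_lines_alt poem line_limit
instance (poem : String) (line_limit : Int) (out : String) : Decidable (Spec_limit_to_n_lines poem line_limit out) := by unfold Spec_limit_to_n_lines; infer_instance

-- ===== CLAIM (what is proved, stated in full; the proofs are below) =====
def Claim_equal_limit_to_n_lines : Prop := ∀ (poem : String) (line_limit : Int), Dom_limit_to_n_lines poem line_limit → Spec_limit_to_n_lines poem line_limit (limit_to_n_lines poem line_limit)

-- ===== LEMMAS AND PROOFS =====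

-- proof-side view of B's search: first index of counts whose entry reaches the limit
def pvCut (counts : List Int) (lim : Int) : Option Nat :=
  match counts with
  | [] => none
  | c :: rest => if c ≥ lim then some 0 else (pvCut rest lim).map (· + 1)

theorem pvFind_enum_fst (counts : List Int) (lim s : Int) :
    ((PySem.List.enumerate counts s).find? (fun p => decide (p.2 ≥ lim))).map (·.1)
      = (pvCut counts lim).map (fun (k : Nat) => s + (k : Int)) := by
  induction counts generalizing s with
  | nil => simp [pvCut, PySem.List.enumerate_nil]
  | cons c rest ih =>
    rw [PySem.List.enumerate_cons, List.find?_cons]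
    by_cases h : c ≥ lim
    · simp [pvCut, h]
    · simp only [pvCut, h, decide_false]
      rw [ih (s + 1)]
      cases pvCut rest lim <;> simp [add_comm, add_left_comm]

theorem pvALoop_keep (lines : List String) (c : Int) (keep : List String) (lim : Int) :
    pvALoop lines c keep lim = keep ++ pvALoop lines c [] lim := by
  induction lines generalizing c keep with
  | nil => simp [pvALoop]
  | cons line rest ih =>
    simp only [pvALoop]
    by_cases h : lim ≤ (if PySem.Str.strip line = "" then c else c + 1)
    · simp [h]
    · simp only [ge_iff_le, ne_eq, ite_not, if_neg h]
      rw [ih _ (keep ++ [line]), ih _ ([] ++ [line])]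
      simp

theorem pvMain (lines : List String) (c lim : Int) :
    pvALoop lines c [] lim
      = lines.take (match pvCut (pvBCounts lines c) lim with
                    | some k => k + 1
                    | none => lines.length) := by
  induction lines generalizing c with
  | nil => simp [pvALoop, pvBCounts, pvCut]
  | cons line rest ih =>
    simp only [pvALoop, pvBCounts, pvCut]
    by_cases h : lim ≤ (if PySem.Str.strip line = "" then c else c + 1)
    · simp [h]
    · simp only [ge_iff_le, ne_eq, ite_not, if_neg h]
      rw [pvALoop_keep, List.nil_append, ih]
      cases hc : pvCut (pvBCounts rest (if PySem.Str.strip line = "" then c else c + 1)) lim <;>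
        simp [List.take_succ_cons]

theorem pvCutMatch (counts : List Int) (lim : Int) (L : List String) :
    (match (PySem.List.enumerate counts).find? (fun p => decide (p.2 ≥ lim)) with
     | some p => p.1
     | none => PySem.List.len L - 1) + 1
    = (match pvCut counts lim with
       | some k => ((k + 1 : Nat) : Int)
       | none => (L.length : Int)) := by
  have hfind := pvFind_enum_fst counts lim 0
  cases hc : pvCut counts lim with
  | none =>
    rw [hc] at hfind
    simp only [Option.map_none, Option.map_eq_none_iff] at hfind
    rw [hfind]
    simp [PySem.List.len_eq]
  | some k =>
    rw [hc] at hfind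
    simp only [Option.map_some, Option.map_eq_some_iff] at hfind
    obtain ⟨p, hp, hp1⟩ := hfind
    rw [hp]
    show p.1 + 1 = ((k + 1 : Nat) : Int)
    push_cast
    omega

-- ===== VERDICT (by name: the statement is the Claim_ definition above) =====
theorem limit_to_n_lines_spec : Claim_equal_limit_to_n_lines := by
  intro poem line_limit _
  unfold Spec_limit_to_n_lines limit_to_n_lines limit_to_n_lines_alt
  set lines := ((PySem.Str.split? poem "\n").getD []) with hl
  show PySem.Str.join "\n" (pvALoop lines 0 [] line_limit)
      = PySem.Str.join "\n" (PySem.List.slice lines none (some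
          ((match (PySem.List.enumerate (pvBCounts lines 0)).find?
              (fun p => decide (p.2 ≥ line_limit)) with
            | some p => p.1
            | none => PySem.List.len lines - 1) + 1)))
  congr 1
  rw [pvMain lines 0 line_limit, pvCutMatch (pvBCounts lines 0) line_limit lines]
  cases hc : pvCut (pvBCounts lines 0) line_limit with
  | some k =>
    show List.take (k + 1) lines = PySem.List.slice lines none (some ((k + 1 : Nat) : Int))
    rw [PySem.List.slice_to_natCast]
  | none =>
    show List.take lines.length lines
        = PySem.List.slice lines none (some ((lines.length : Nat) : Int))
    rw [PySem.List.slice_to_natCast, List.take_length]
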